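-- pv_equiv track=rewrite | github.com/aimacode/aima-python | logic.py | luby
-- ===== SOURCE A (Python) =====
-- def luby(conflicts, restarts, queue_lbd, sum_lbd, unit=512):
--     # in the state-of-art tested with unit value 1, 2, 4, 6, 8, 12, 16, 32, 64, 128, 256 and 512
--     def _luby(i):
--         k = 1
--         while True:
--             if i == (1 << k) - 1:
--                 return 1 << (k - 1)
--             elif (1 << (k - 1)) <= i < (1 << k) - 1:
--                 return _luby(i - (1 << (k - 1)) + 1)
--             k += 1
--
--     return unit * _luby(restarts) == len(queue_lbd)
-- ===== SOURCE B (Python) =====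
-- def luby(conflicts, restarts, queue_lbd, sum_lbd, unit=512):
--     # Flat iterative descent: repeatedly strip the leading complete Luby block
--     # (of size 2**(b-1) - 1) until i+1 is a power of two, then the value is (i+1)//2.
--     i = restarts
--     b = i.bit_length()
--     while i + 1 != (1 << b):
--         i -= (1 << (b - 1)) - 1
--         b = i.bit_length()
--     return unit * ((i + 1) >> 1) == len(queue_lbd)
-- ===== Notes on version B (the rewrite author's own statement) =====
-- stated objective: simpler
-- what changed: Replaced A's recursive _luby with its inner while-True scan over k by a single flat loop that uses bit_length to locate the Luby block directly and strips complete blocks until i+1 is a power of two; no recursion and no per-level k-scan remain.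
import Mathlib
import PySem

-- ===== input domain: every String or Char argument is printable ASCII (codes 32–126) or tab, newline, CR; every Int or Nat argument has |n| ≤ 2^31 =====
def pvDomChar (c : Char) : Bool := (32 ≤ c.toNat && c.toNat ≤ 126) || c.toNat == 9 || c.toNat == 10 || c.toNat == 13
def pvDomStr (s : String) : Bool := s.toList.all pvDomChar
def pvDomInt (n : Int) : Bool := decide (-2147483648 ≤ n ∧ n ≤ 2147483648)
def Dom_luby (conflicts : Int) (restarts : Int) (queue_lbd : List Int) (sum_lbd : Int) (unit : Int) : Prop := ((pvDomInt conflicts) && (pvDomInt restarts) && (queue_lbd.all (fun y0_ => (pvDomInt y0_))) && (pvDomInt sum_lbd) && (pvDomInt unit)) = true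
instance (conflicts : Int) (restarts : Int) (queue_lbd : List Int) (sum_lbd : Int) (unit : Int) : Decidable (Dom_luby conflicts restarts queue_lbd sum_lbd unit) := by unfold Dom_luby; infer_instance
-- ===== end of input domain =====

-- B replaces A's recursion-plus-k-scan by a flat loop using bit_length; objective: simpler.

-- ===== PORT A =====
-- A's `_luby`: the inner `while True` over k and the recursion are fused into one
-- fuel recursion; each `k += 1` and each recursive `_luby(...)` call consumes one
-- unit of fuel.  Fuel 2 * restarts.toNat suffices for every restarts ≥ 1 (proved in
-- lubyA_eq below); for restarts ≤ 0 the Python loops forever (excluded by Pre_luby).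
def lubyA (fuel : Nat) (i : Int) (k : Nat) : Int :=
  match fuel with
  | 0 => 0  -- fuel exhausted: unreachable under Pre_luby
  | f + 1 =>
    if i = 2 ^ k - 1 then 2 ^ (k - 1)
    else if 2 ^ (k - 1) ≤ i ∧ i < 2 ^ k - 1 then lubyA f (i - 2 ^ (k - 1) + 1) 1
    else lubyA f i (k + 1)

def luby (conflicts : Int) (restarts : Int) (queue_lbd : List Int) (sum_lbd : Int) (unit : Int) : Bool :=
  decide (unit * lubyA (2 * restarts.toNat) restarts 1 = (queue_lbd.length : Int))

-- ===== PORT B =====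
-- Python int.bit_length(): exact for i ≥ 0 (B only applies it to positive ints under Pre_luby).
def pyBitLength (i : Int) : Nat := if i ≤ 0 then 0 else Nat.log2 i.toNat + 1

-- B's `while` loop, one fuel unit per iteration; fuel restarts.toNat suffices for
-- every restarts ≥ 1 (proved in lubyA_eq below).
def lubyBLoop (fuel : Nat) (i : Int) : Int :=
  match fuel with
  | 0 => i
  | f + 1 =>
    if i + 1 ≠ 2 ^ pyBitLength i then lubyBLoop f (i - (2 ^ (pyBitLength i - 1) - 1)) else i

def luby_alt (conflicts : Int) (restarts : Int) (queue_lbd : List Int) (sum_lbd : Int) (unit : Int) : Bool :=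
  let i := lubyBLoop restarts.toNat restarts
  -- (i + 1) >> 1 in Python = floor division by 2
  decide (unit * PySem.Int.floordiv (i + 1) 2 = (queue_lbd.length : Int))

-- ===== PRECONDITION & SPEC =====
-- Pre_ excludes restarts ≤ 0, on which A's inner `while True` never terminates (A returns no value there).
def Pre_luby (conflicts : Int) (restarts : Int) (queue_lbd : List Int) (sum_lbd : Int) (unit : Int) : Prop := 1 ≤ restarts
instance (conflicts : Int) (restarts : Int) (queue_lbd : List Int) (sum_lbd : Int) (unit : Int) : Decidable (Pre_luby conflicts restarts queue_lbd sum_lbd unit) := by unfold Pre_luby; infer_instance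

def pvWitness_luby : Int × Int × List Int × Int × Int := (0, 3, [7, 9], 0, 1)

def Spec_luby (conflicts : Int) (restarts : Int) (queue_lbd : List Int) (sum_lbd : Int) (unit : Int) (out : Bool) : Prop := out = luby_alt conflicts restarts queue_lbd sum_lbd unit
instance (conflicts : Int) (restarts : Int) (queue_lbd : List Int) (sum_lbd : Int) (unit : Int) (out : Bool) : Decidable (Spec_luby conflicts restarts queue_lbd sum_lbd unit out) := by unfold Spec_luby; infer_instance

-- ===== CLAIM (what is proved, stated in full; the proofs are below) =====
def Claim_equal_luby : Prop := ∀ (conflicts : Int) (restarts : Int) (queue_lbd : List Int) (sum_lbd : Int) (unit : Int), Dom_luby conflicts restarts queue_lbd sum_lbd unit → Pre_luby conflicts restarts queue_lbd sum_lbd unit → Spec_luby conflicts restarts queue_lbd sum_lbd unit (luby conflicts restarts queue_lbd sum_lbd unit)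

-- ===== LEMMAS AND PROOFS =====

-- A's k-scan: while 2^k ≤ i both branch tests fail and k is only incremented.
lemma scan_step (f : Nat) (i : Int) (k : Nat) (h : 2 ^ k ≤ i) :
    lubyA (f + 1) i k = lubyA f i (k + 1) := by
  have h1 : ¬ (i = 2 ^ k - 1) := by omega
  have h2 : ¬ (2 ^ (k - 1) ≤ i ∧ i < 2 ^ k - 1) := by omega
  simp [lubyA, h1, h2]

lemma scan_many (d : Nat) : ∀ (f : Nat) (i : Int) (k : Nat),
    (∀ j, j < d → 2 ^ (k + j) ≤ i) → lubyA (f + d) i k = lubyA f i (k + d) := by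
  induction d with
  | zero => intro f i k _; rfl
  | succ d ih =>
    intro f i k h
    have h0 : (2 : Int) ^ k ≤ i := by simpa using h 0 (by omega)
    have : f + (d + 1) = (f + d) + 1 := by omega
    rw [this, scan_step (f + d) i k h0, ih f i (k + 1) (fun j hj => by
      have := h (j + 1) (by omega); simpa [Nat.add_assoc, Nat.add_comm 1 j] using this)]
    ring_nf

lemma pyBitLength_coe (n : Nat) (hn : 1 ≤ n) : pyBitLength (n : Int) = Nat.log2 n + 1 := by
  have h0 : ¬ (n = 0) := by omega
  have h : ¬ ((n : Int) ≤ 0) := by omega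
  simp [pyBitLength, h, h0]

lemma floordiv_two_mul (x : Int) : PySem.Int.floordiv (2 * x) 2 = x := by
  simp [PySem.Int.floordiv]

-- Main lemma: with sufficient fuel, A's recursive value equals (final B-loop value + 1) / 2.
lemma lubyA_eq (n : Nat) : ∀ (fa fb : Nat), 1 ≤ n → 2 * n ≤ fa → n ≤ fb →
    lubyA fa (n : Int) 1 = PySem.Int.floordiv (lubyBLoop fb (n : Int) + 1) 2 := by
  induction n using Nat.strong_induction_on with
  | _ n ih =>
    intro fa fb hn hfa hfb
    set k0 : Nat := Nat.log2 n + 1 with hk0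
    have hlow : 2 ^ (k0 - 1) ≤ n := by simpa [hk0] using Nat.log2_self_le (by omega : n ≠ 0)
    have hhigh : n < 2 ^ k0 := by simpa [hk0] using Nat.lt_log2_self (n := n)
    have hk0pow : k0 ≤ 2 ^ (k0 - 1) := by
      have := Nat.lt_two_pow_self (n := k0 - 1); omega
    have hfa1 : k0 ≤ fa := by omega
    -- advance the scan from k = 1 to k = k0
    have hbound : ∀ j, j < k0 - 1 → (2 : Int) ^ (1 + j) ≤ (n : Int) := by
      intro j hj
      have h1 : 2 ^ (1 + j) ≤ 2 ^ (k0 - 1) := Nat.pow_le_pow_right (by omega) (by omega)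
      have h2 : ((2 : Int)) ^ (1 + j) ≤ ((2 ^ (k0 - 1) : Nat) : Int) := by exact_mod_cast h1
      have h3 : ((2 ^ (k0 - 1) : Nat) : Int) ≤ (n : Int) := by exact_mod_cast hlow
      omega
    have hk1 : 1 + (k0 - 1) = k0 := by omega
    have hfaeq : fa = (fa - (k0 - 1)) + (k0 - 1) := by omega
    have hscan : lubyA fa (n : Int) 1 = lubyA (fa - (k0 - 1)) (n : Int) k0 := by
      calc lubyA fa (n : Int) 1
          = lubyA ((fa - (k0 - 1)) + (k0 - 1)) (n : Int) 1 := by rw [← hfaeq]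
        _ = lubyA (fa - (k0 - 1)) (n : Int) (1 + (k0 - 1)) :=
            scan_many (k0 - 1) (fa - (k0 - 1)) (n : Int) 1 hbound
        _ = lubyA (fa - (k0 - 1)) (n : Int) k0 := by rw [hk1]
    obtain ⟨fa', hfa'⟩ : ∃ fa', fa - (k0 - 1) = fa' + 1 := ⟨fa - (k0 - 1) - 1, by omega⟩
    obtain ⟨fb', hfb'⟩ : ∃ fb', fb = fb' + 1 := ⟨fb - 1, by omega⟩
    have hbl : pyBitLength (n : Int) = k0 := by rw [pyBitLength_coe n hn, hk0]
    have hlowI : ((2:Int) ^ (k0 - 1)) ≤ (n : Int) := by exact_mod_cast hlow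
    have hhighI : (n : Int) < (2:Int) ^ k0 := by exact_mod_cast hhigh
    by_cases hcase : (n : Int) = 2 ^ k0 - 1
    · -- base case: n + 1 is a power of two; both sides give 2^(k0-1)
      have hexit : ¬ ((n : Int) + 1 ≠ 2 ^ pyBitLength (n : Int)) := by
        rw [hbl]
        exact not_ne_iff.mpr (by omega)
      rw [hscan, hfa', hfb']
      simp only [lubyA, lubyBLoop, if_pos hcase, if_neg hexit]
      have h2 : (n : Int) + 1 = 2 * 2 ^ (k0 - 1) := by
        have hs : (2 : Int) ^ ((k0 - 1) + 1) = 2 * 2 ^ (k0 - 1) := pow_succ' 2 (k0 - 1)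
        have hk : (k0 - 1) + 1 = k0 := by omega
        rw [hk] at hs
        omega
      rw [h2, floordiv_two_mul]
    · -- recursive case: both sides step to n' = n - (2^(k0-1) - 1)
      have hk02 : 2 ≤ k0 := by
        by_contra h
        have hk01 : k0 = 1 := by omega
        have h2 : (2 : Int) ^ k0 = 2 := by rw [hk01]; norm_num
        omega
      have hmid : 2 ^ (k0 - 1) ≤ (n : Int) ∧ (n : Int) < 2 ^ k0 - 1 := ⟨hlowI, by omega⟩
      set m : Nat := n - (2 ^ (k0 - 1) - 1) with hm
      have hpowpos : 1 ≤ 2 ^ (k0 - 1) := Nat.one_le_two_pow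
      have hmcast : ((m : Nat) : Int) = (n : Int) - 2 ^ (k0 - 1) + 1 := by
        have : ((2 ^ (k0 - 1) : Nat) : Int) = (2:Int) ^ (k0 - 1) := by push_cast; ring
        omega
      have hmlt : m < n := by
        have : 2 ≤ 2 ^ (k0 - 1) := by
          calc 2 = 2 ^ 1 := rfl
          _ ≤ 2 ^ (k0 - 1) := Nat.pow_le_pow_right (by omega) (by omega)
        omega
      have hm1 : 1 ≤ m := by omega
      have henter : (n : Int) + 1 ≠ (2 : Int) ^ k0 := by omega
      rw [hscan, hfa', hfb']
      simp only [lubyA, lubyBLoop, if_neg hcase, if_pos hmid, hbl]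
      rw [if_pos henter]
      have hstepB : (n : Int) - (2 ^ (k0 - 1) - 1) = (m : Int) := by omega
      have hstepA : (n : Int) - 2 ^ (k0 - 1) + 1 = (m : Int) := by omega
      rw [hstepB, hstepA]
      apply ih m hmlt fa' fb' hm1
      · -- 2 * m ≤ fa': fa' = fa - (k0-1) - 1 ≥ 2n - k0 and 2(n - m) = 2(2^(k0-1)-1) ≥ k0 for k0 ≥ 2
        have : k0 ≤ 2 * (2 ^ (k0 - 1) - 1) := by omega
        omega
      · omega

lemma pre_toNat (restarts : Int) (h : 1 ≤ restarts) :
    (restarts.toNat : Int) = restarts ∧ 1 ≤ restarts.toNat := by omega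

-- ===== VERDICT (by name: the statement is the Claim_ definition above) =====
theorem luby_spec : Claim_equal_luby := by
  intro conflicts restarts queue_lbd sum_lbd unit _ hpre
  unfold Spec_luby luby luby_alt
  obtain ⟨hcast, hge⟩ := pre_toNat restarts hpre
  have := lubyA_eq restarts.toNat (2 * restarts.toNat) restarts.toNat hge (le_refl _) (le_refl _)
  rw [hcast] at this
  simp only [this]
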